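-- pv_equiv track=rewrite | github.com/Pegoku/PythonBasic | Exclasse/a.py | paraulaMesLlarga
-- ===== SOURCE A (Python) =====
-- def paraulaMesLlarga(llista):
--     paraula = ""
--     nLlargaries = {}
--     for i in llista:
--         if len(i) > len(paraula):
--             paraula = i
--         nLlargaries[len(i)] = nLlargaries.get(len(i), 0) + 1
--     nLlargaries = dict(sorted(nLlargaries.items()))
--     return paraula, nLlargaries
-- ===== SOURCE B (Python) =====
-- def paraulaMesLlarga(llista):
--     # longest word = first maximum-length element; frequencies from sorted lengths grouped by runs
--     if not llista:
--         return "", {}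
--     paraula = max(llista, key=len)
--     lengths = sorted(len(w) for w in llista)
--     freq = {}
--     while lengths:
--         x = lengths[0]
--         rest = lengths[1:]
--         run = 0
--         while run < len(rest) and rest[run] == x:
--             run += 1
--         freq[x] = 1 + run
--         lengths = rest[run:]
--     return paraula, freq
-- ===== Notes on version B (the rewrite author's own statement) =====
-- stated objective: alternative
-- what changed: B replaces A's single pass that tracks the running longest word and hash-counts lengths (then sorts the dict items) by max(key=len) for the word plus run-length grouping of the pre-sorted length list for the frequencies.
import Mathlib
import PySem

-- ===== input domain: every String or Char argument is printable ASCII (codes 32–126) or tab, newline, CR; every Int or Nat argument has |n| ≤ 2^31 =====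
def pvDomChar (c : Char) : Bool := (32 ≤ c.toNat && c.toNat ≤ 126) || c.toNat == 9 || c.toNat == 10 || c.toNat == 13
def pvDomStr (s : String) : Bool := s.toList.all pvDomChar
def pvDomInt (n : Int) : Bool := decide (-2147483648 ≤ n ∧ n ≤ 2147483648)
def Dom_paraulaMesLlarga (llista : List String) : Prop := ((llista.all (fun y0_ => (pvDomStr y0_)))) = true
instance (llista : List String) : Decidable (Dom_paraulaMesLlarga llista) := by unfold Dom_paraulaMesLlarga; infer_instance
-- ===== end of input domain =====

-- B replaces A's running-longest + hash-counting loop by max(key=len) and run-length grouping of the sorted lengths (objective: alternative decomposition, same cost).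

-- ===== PORT A =====
def paraulaMesLlarga (llista : List String) : String × (List (Int × Int)) :=
  let st := llista.foldl
    (fun (st : String × PySem.Dict Int Int) i =>
      let paraula := if PySem.Str.len st.1 < PySem.Str.len i then i else st.1
      (paraula, st.2.insert (PySem.Str.len i) (st.2.getD (PySem.Str.len i) 0 + 1)))
    ("", PySem.Dict.empty)
  (st.1, PySem.List.sorted2 st.2.items (fun p => p.1) (fun p => p.2))

-- ===== PORT B =====
-- the two nested while loops of Source B: split off the leading run of equal lengths, record it
def pvRuns : List Int → List (Int × Int)
  | [] => []
  | x :: rest =>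
      let run := rest.takeWhile (fun y => y == x)
      (x, 1 + (run.length : Int)) :: pvRuns (rest.drop run.length)
  termination_by l => l.length
  decreasing_by simp

def paraulaMesLlarga_alt (llista : List String) : String × (List (Int × Int)) :=
  match llista with
  | [] => ("", [])
  | _ :: _ =>
    let paraula := PySem.List.maxD llista (fun w => PySem.Str.len w) ""
    let lengths := PySem.List.sorted (llista.map (fun w => PySem.Str.len w)) (fun x => x)
    (paraula, pvRuns lengths)

-- ===== PRECONDITION & SPEC =====
def Spec_paraulaMesLlarga (llista : List String) (out : String × (List (Int × Int))) : Prop := out = paraulaMesLlarga_alt llista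
instance (llista : List String) (out : String × (List (Int × Int))) : Decidable (Spec_paraulaMesLlarga llista out) := by unfold Spec_paraulaMesLlarga; infer_instance

-- ===== CLAIM (what is proved, stated in full; the proofs are below) =====
def Claim_equal_paraulaMesLlarga : Prop := ∀ (llista : List String), Dom_paraulaMesLlarga llista → Spec_paraulaMesLlarga llista (paraulaMesLlarga llista)

-- ===== LEMMAS AND PROOFS =====

-- A's single loop carries the pair (longest word, counting dict); it splits into two independent folds
theorem pv_split (l : List String) (p : String) (d : PySem.Dict Int Int) :
    l.foldl
      (fun (st : String × PySem.Dict Int Int) i =>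
        ((if PySem.Str.len st.1 < PySem.Str.len i then i else st.1),
          st.2.insert (PySem.Str.len i) (st.2.getD (PySem.Str.len i) 0 + 1))) (p, d)
    = (l.foldl (fun q i => if PySem.Str.len q < PySem.Str.len i then i else q) p,
       l.foldl (fun e i => e.insert (PySem.Str.len i) (e.getD (PySem.Str.len i) 0 + 1)) d) := by
  induction l generalizing p d with
  | nil => rfl
  | cons x xs ih => simp only [List.foldl_cons]; exact ih _ _

theorem pv_len_zero (x : String) (h : PySem.Str.len x ≤ 0) : x = "" := by
  have hl : x.toList.length = 0 := by simp only [PySem.Str.len] at h; omega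
  exact String.toList_inj.mp ((List.length_eq_zero_iff.mp hl).trans rfl)

-- A's running-longest fold equals Python max(llista, key=len) on a nonempty list
theorem pv_max_opt (ys : List String) (m : String) :
    PySem.List.max? (m :: ys) (fun w => PySem.Str.len w)
    = some (ys.foldl (fun q i => if PySem.Str.len q < PySem.Str.len i then i else q) m) := by
  induction ys generalizing m with
  | nil => rfl
  | cons y ys ih =>
    have e1 : PySem.List.max? (m :: y :: ys) (fun w => PySem.Str.len w)
        = PySem.List.max? ((if PySem.Str.len m < PySem.Str.len y then y else m) :: ys)
            (fun w => PySem.Str.len w) := by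
      unfold PySem.List.max?
      simp only [List.foldl_cons]
      congr 1
      split <;> rfl
    rw [e1, ih]
    simp only [List.foldl_cons]

theorem pv_max (x : String) (xs : List String) :
    (x :: xs).foldl (fun q i => if PySem.Str.len q < PySem.Str.len i then i else q) ""
    = PySem.List.maxD (x :: xs) (fun w => PySem.Str.len w) "" := by
  have h0 : (if PySem.Str.len "" < PySem.Str.len x then x else "") = x := by
    by_cases h : PySem.Str.len "" < PySem.Str.len x
    · simp only [if_pos h]
    · have hx : x = "" := pv_len_zero x (by simpa [PySem.Str.len] using h)
      simp [hx]
  unfold PySem.List.maxD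
  rw [pv_max_opt xs x]
  simp only [List.foldl_cons, h0]
  rfl

-- PySem.Set.ofList helpers
theorem pv_add_mem (s : PySem.Set Int) (y : Int) (h : y ∈ s) : PySem.Set.add s y = s := by
  simp [PySem.Set.add, h]

theorem pv_foldl_add_run (run : List Int) (x : Int) (s : PySem.Set Int) (hx : x ∈ s)
    (hall : ∀ y ∈ run, y = x) : run.foldl PySem.Set.add s = s := by
  induction run with
  | nil => rfl
  | cons y ys ih =>
    have hy : y = x := hall y (by simp)
    simp only [List.foldl_cons, hy, pv_add_mem s x hx]
    exact ih (fun z hz => hall z (by simp [hz]))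

theorem pv_foldl_add_cons (ys : List Int) (x : Int) (s : List Int)
    (h : ∀ y ∈ ys, y ≠ x) : ys.foldl PySem.Set.add (x :: s) = x :: ys.foldl PySem.Set.add s := by
  induction ys generalizing s with
  | nil => rfl
  | cons y t ih =>
    have hy : y ≠ x := h y (by simp)
    have hstep : PySem.Set.add (x :: s) y = x :: PySem.Set.add s y := by
      by_cases hc : y ∈ s <;> simp [PySem.Set.add, hy, hc]
    simp only [List.foldl_cons, hstep]
    exact ih _ (fun z hz => h z (by simp [hz]))

theorem pv_dropWhile_head_false {p : Int → Bool} :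
    ∀ (l : List Int) (y0 : Int) (t : List Int), l.dropWhile p = y0 :: t → p y0 = false := by
  intro l
  induction l with
  | nil => intro y0 t h; simp at h
  | cons a l ihl =>
    intro y0 t h
    rw [List.dropWhile_cons] at h
    by_cases ha : p a = true
    · rw [if_pos ha] at h; exact ihl y0 t h
    · rw [if_neg ha] at h; cases h; simpa using ha

-- runs of a weakly sorted list = distinct values in order, with their multiplicities
theorem pv_runs_spec (S : List Int) (hs : S.Pairwise (· ≤ ·)) :
    pvRuns S = (PySem.Set.ofList S).map (fun k => (k, (S.count k : Int)))
    ∧ (PySem.Set.ofList S : List Int).Pairwise (· < ·) := by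
  induction S using pvRuns.induct with
  | case1 => exact ⟨by rw [pvRuns]; simp [PySem.Set.ofList, PySem.Set.empty], List.Pairwise.nil⟩
  | case2 x rest run ih =>
    have hrest : rest.Pairwise (· ≤ ·) := (List.pairwise_cons.mp hs).2
    have hle : ∀ y ∈ rest, x ≤ y := (List.pairwise_cons.mp hs).1
    have hdrop : rest.drop run.length = rest.dropWhile (fun y => y == x) := by
      conv_lhs => rw [← List.takeWhile_append_dropWhile (p := fun y => y == x) (l := rest)]
      exact List.drop_left
    set rest' := rest.dropWhile (fun y => y == x) with hrest'
    have hrun : ∀ y ∈ run, y = x := fun y hy => by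
      have := List.mem_takeWhile_imp hy; simpa using this
    have hpw' : rest'.Pairwise (· ≤ ·) := hrest.sublist (List.dropWhile_sublist _)
    have hx_lt : ∀ y ∈ rest', x < y := by
      cases hr : rest' with
      | nil => simp
      | cons y0 t =>
        have hy0r : y0 ∈ rest := (List.dropWhile_sublist _).mem (by rw [← hrest', hr]; simp)
        have hy0ne : y0 ≠ x := by
          have := pv_dropWhile_head_false rest y0 t (by rw [← hrest']; exact hr)
          simpa using this
        have hxy0 : x < y0 := lt_of_le_of_ne (hle y0 hy0r) (Ne.symm hy0ne)
        intro y hy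
        rcases List.mem_cons.mp hy with h1 | h2
        · exact h1 ▸ hxy0
        · have : y0 ≤ y := (List.pairwise_cons.mp (hr ▸ hpw')).1 y h2
          exact lt_of_lt_of_le hxy0 this
    have hxnot : x ∉ rest' := fun h => lt_irrefl x (hx_lt x h)
    have hsplitrest : rest = run ++ rest' := (List.takeWhile_append_dropWhile).symm
    have ihr := ih (hdrop ▸ hpw')
    rw [hdrop] at ihr
    -- Set.ofList (x :: rest) = x :: Set.ofList rest'
    have hof : (PySem.Set.ofList (x :: rest) : List Int) = x :: PySem.Set.ofList rest' := by
      show List.foldl PySem.Set.add PySem.Set.empty (x :: rest) = _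
      rw [List.foldl_cons]
      have hempty : PySem.Set.add PySem.Set.empty x = [x] := rfl
      rw [hempty, hsplitrest, List.foldl_append,
        pv_foldl_add_run run x [x] (by simp) hrun,
        pv_foldl_add_cons rest' x [] (fun y hy => ne_of_gt (hx_lt y hy))]
      rfl
    -- counts
    have hcx : ((x :: rest).count x : Int) = 1 + (run.length : Int) := by
      rw [hsplitrest]
      have h1 : run.count x = run.length :=
        List.count_eq_length.mpr (fun b hb => by simp [hrun b hb])
      have h2 : rest'.count x = 0 := List.count_eq_zero.mpr hxnot
      simp [List.count_append, h1, h2]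
      omega
    have hck : ∀ k ∈ (PySem.Set.ofList rest' : List Int),
        ((x :: rest).count k : Int) = (rest'.count k : Int) := by
      intro k hk
      have hk' : k ∈ rest' := (PySem.Set.mem_ofList _ _).mp hk
      have hkx : k ≠ x := ne_of_gt (hx_lt k hk')
      have h1 : run.count k = 0 :=
        List.count_eq_zero.mpr (fun h => hkx (hrun k h))
      rw [hsplitrest]
      simp [List.count_append, h1, Ne.symm hkx]
    constructor
    · rw [pvRuns, hof, List.map_cons]
      have hdrop' : List.drop (List.takeWhile (fun y => y == x) rest).length rest = rest' :=
        hdrop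
      rw [hdrop', ihr.1]
      refine congrArg₂ _ ?_ ?_
      · rw [hcx]
      · exact (List.map_congr_left (fun k hk => by simp [hck k hk])).symm
    · rw [hof]
      exact List.pairwise_cons.mpr
        ⟨fun y hy => hx_lt y ((PySem.Set.mem_ofList _ _).mp hy), ihr.2⟩

-- insertion sort with a lex tuple key = insertion sort by the first key, given distinct first keys
theorem pv_insertBy_congr {α : Type} (b1 b2 : α → α → Bool) (x : α) (ys : List α)
    (h : ∀ y ∈ ys, b1 x y = b2 x y) :
    PySem.List.insertBy b1 x ys = PySem.List.insertBy b2 x ys := by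
  induction ys with
  | nil => rfl
  | cons y t ih =>
    rw [PySem.List.insertBy, PySem.List.insertBy, h y (by simp)]
    by_cases hb : b2 x y = true
    · simp [hb]
    · simp [hb, ih (fun z hz => h z (by simp [hz]))]

theorem pv_foldl_insertBy_congr {α : Type} (b1 b2 : α → α → Bool) (xs acc : List α)
    (h : ∀ a ∈ xs, ∀ y, (y ∈ acc ∨ y ∈ xs) → b1 a y = b2 a y) :
    xs.foldl (fun acc x => PySem.List.insertBy b1 x acc) acc
    = xs.foldl (fun acc x => PySem.List.insertBy b2 x acc) acc := by
  induction xs generalizing acc with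
  | nil => rfl
  | cons x t ih =>
    simp only [List.foldl_cons]
    rw [pv_insertBy_congr b1 b2 x acc
      (fun y hy => h x (by simp) y (Or.inl hy))]
    exact ih _ (fun a ha y hy => h a (by simp [ha]) y (by
      rcases hy with hy | hy
      · rcases (PySem.List.mem_insertBy _ _ _ _).mp hy with h1 | h1
        · exact Or.inr (by simp [h1])
        · exact Or.inl h1
      · exact Or.inr (by simp [hy])))

theorem pv_sorted2_eq_sorted_fst (xs : List (Int × Int))
    (hinj : ∀ a ∈ xs, ∀ b ∈ xs, a.1 = b.1 → a = b) :
    PySem.List.sorted2 xs (fun p => p.1) (fun p => p.2)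
    = PySem.List.sorted xs (fun p => p.1) := by
  show xs.foldl (fun acc x => PySem.List.insertBy _ x acc) []
    = xs.foldl (fun acc x => PySem.List.insertBy _ x acc) []
  refine pv_foldl_insertBy_congr _ _ xs [] ?_
  intro a ha y hy
  rcases hy with hy | hy
  · simp at hy
  · by_cases hab : a = y
    · subst hab; simp
    · have hne : a.1 ≠ y.1 := fun hfst => hab (hinj a ha y hy hfst)
      rcases lt_or_gt_of_ne hne with hlt | hgt
      · simp [hlt]
      · simp [hgt, not_lt_of_gt hgt]

-- the sorted items of A's counting dict equal B's runs of the sorted length list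
theorem pv_counter_sorted (L : List Int) :
    PySem.List.sorted2 (PySem.Dict.counter L).items (fun p => p.1) (fun p => p.2)
    = pvRuns (PySem.List.sorted L (fun x => x)) := by
  set S := PySem.List.sorted L (fun x => x) with hS
  have hpw : S.Pairwise (· ≤ ·) := by
    have := PySem.List.sorted_pairwise L (fun x => x)
    simpa using this
  obtain ⟨hruns, hlt⟩ := pv_runs_spec S hpw
  have hperm : S.Perm L := PySem.List.sorted_perm L (fun x => x) false
  have hcount : ∀ k : Int, S.count k = L.count k := fun k => hperm.count_eq k
  have hitems : (PySem.Dict.counter L).items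
      = (PySem.Set.ofList L : List Int).map (fun k => (k, (L.count k : Int))) :=
    PySem.Dict.items_counter L
  -- distinct first components of items
  have hinj : ∀ a ∈ (PySem.Dict.counter L).items, ∀ b ∈ (PySem.Dict.counter L).items,
      a.1 = b.1 → a = b := by
    intro a ha b hb hfst
    rw [hitems] at ha hb
    obtain ⟨k1, _, rfl⟩ := List.mem_map.mp ha
    obtain ⟨k2, _, rfl⟩ := List.mem_map.mp hb
    simp at hfst; simp [hfst]
  rw [pv_sorted2_eq_sorted_fst _ hinj]
  -- name the sorted order of items
  have hperm' : ((PySem.Set.ofList S : List Int).map (fun k => (k, (L.count k : Int)))).Perm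
      ((PySem.Dict.counter L).items) := by
    rw [hitems]
    refine List.Perm.map _ ?_
    exact (List.perm_ext_iff_of_nodup (PySem.Set.nodup_ofList S) (PySem.Set.nodup_ofList L)).mpr
      (fun a => by
        rw [PySem.Set.mem_ofList, PySem.Set.mem_ofList, hperm.mem_iff])
  have hpwlt : ((PySem.Set.ofList S : List Int).map (fun k => (k, (L.count k : Int)))).Pairwise
      (fun a b => a.1 < b.1) := List.Pairwise.map _ (fun a b h => by simpa using h) hlt
  rw [PySem.List.sorted_eq_of_perm_of_pairwise_lt _ _ _ hperm' hpwlt, hruns]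
  exact (List.map_congr_left (fun k _ => by simp [hcount k])).symm

-- ===== VERDICT (by name: the statement is the Claim_ definition above) =====
theorem paraulaMesLlarga_spec : Claim_equal_paraulaMesLlarga := by
  intro llista _
  unfold Spec_paraulaMesLlarga paraulaMesLlarga paraulaMesLlarga_alt
  cases llista with
  | nil => rfl
  | cons x xs =>
    dsimp only
    rw [pv_split]
    dsimp only
    have hd : (x :: xs).foldl
        (fun e i => e.insert (PySem.Str.len i) (e.getD (PySem.Str.len i) 0 + 1))
        PySem.Dict.empty
        = PySem.Dict.counter ((x :: xs).map (fun w => PySem.Str.len w)) := by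
      rw [← PySem.Dict.foldl_insert_getD_add_one_eq_counter, List.foldl_map]
    rw [hd, pv_counter_sorted, pv_max]
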